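-- pv_equiv track=rewrite | github.com/24tngus/python3 | Programmers/LV0/pg0_20 외계어 사전.py | solution
-- ===== SOURCE A (Python) =====
-- def solution(spell, dic):
--     answer = 2
--
--     n = len(spell)
--
--     for word in dic:
--         if len(word) != n:
--             continue
--
--         cnt = 0
--
--         word = list(set(word)) # 중복 제거
--
--         for i in word:
--             if i in spell:
--                 cnt += 1
--
--         if cnt == n:
--             answer = 1
--
--     return answer
-- ===== SOURCE B (Python) =====
-- def solution(spell, dic):
--     key = sorted(set(spell))
--     if len(key) != len(spell):
--         return 2
--     return 1 if any(sorted(word) == key for word in dic) else 2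
-- ===== Notes on version B (the rewrite author's own statement) =====
-- stated objective: alternative
-- what changed: A counts, per word, how many distinct letters of the word occur in spell; B instead precomputes one canonical key sorted(set(spell)), returns 2 up front when spell has duplicate letters (no word can ever match then), and matches a word by the single comparison sorted(word) == key.
import Mathlib
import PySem

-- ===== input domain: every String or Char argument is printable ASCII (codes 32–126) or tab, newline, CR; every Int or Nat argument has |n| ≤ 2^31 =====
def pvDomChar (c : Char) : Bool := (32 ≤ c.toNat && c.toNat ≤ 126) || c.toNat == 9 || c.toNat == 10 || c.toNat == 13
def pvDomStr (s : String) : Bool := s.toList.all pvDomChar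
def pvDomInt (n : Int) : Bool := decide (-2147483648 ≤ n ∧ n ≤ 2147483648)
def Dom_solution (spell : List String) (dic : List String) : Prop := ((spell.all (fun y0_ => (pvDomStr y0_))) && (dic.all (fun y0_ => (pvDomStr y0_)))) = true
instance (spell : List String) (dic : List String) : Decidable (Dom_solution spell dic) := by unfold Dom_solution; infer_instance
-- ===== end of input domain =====

-- B replaces A's per-word distinct-letter counting against spell by a canonical-form test:
-- sort set(spell) once into a key, answer 2 immediately when spell has duplicate letters,
-- and match a word iff sorted(word) equals that key (objective: alternative).

-- ===== PORT A =====
-- A iterates over list(set(word)); the count it accumulates is order-independent, so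
-- folding over PySem.Set.ofList (first-occurrence order) is exact.
def solution (spell : List String) (dic : List String) : Int :=
  let n : Int := PySem.List.len spell
  dic.foldl (fun answer word =>
    if PySem.Str.len word ≠ n then answer
    else
      let w : PySem.Set Char := PySem.Set.ofList word.toList   -- word = list(set(word))
      let cnt : Int := w.foldl (fun c i => if String.ofList [i] ∈ spell then c + 1 else c) 0
      if cnt = n then 1 else answer) 2

-- ===== PORT B =====
-- a char of a Python string is itself a 1-character string, hence the String.ofList [c] view
def solution_alt (spell : List String) (dic : List String) : Int :=
  let key : List String := PySem.List.sorted (PySem.Set.ofList spell) (fun x => x) false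
  if PySem.List.len key ≠ PySem.List.len spell then 2
  else if dic.any (fun word =>
      PySem.List.sorted (word.toList.map (fun c => String.ofList [c])) (fun x => x) false == key)
    then 1 else 2

-- ===== PRECONDITION & SPEC =====
def Spec_solution (spell : List String) (dic : List String) (out : Int) : Prop := out = solution_alt spell dic
instance (spell : List String) (dic : List String) (out : Int) : Decidable (Spec_solution spell dic out) := by unfold Spec_solution; infer_instance

-- ===== CLAIM (what is proved, stated in full; the proofs are below) =====
def Claim_equal_solution : Prop := ∀ (spell : List String) (dic : List String), Dom_solution spell dic → Spec_solution spell dic (solution spell dic)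

-- ===== LEMMAS AND PROOFS =====

theorem mkSingleton_inj : Function.Injective (fun c => String.ofList [c]) := by
  intro a b h
  have h2 := String.ofList_inj.mp h
  simpa using h2

-- A's per-word success condition equals B's canonical-key test
theorem matchA_iff (spell : List String) (word : String) :
    (PySem.Str.len word = PySem.List.len spell ∧
      ((PySem.Set.ofList word.toList).foldl
          (fun c i => if String.ofList [i] ∈ spell then c + 1 else c) (0 : Int))
        = PySem.List.len spell)
    ↔ ((PySem.List.sorted (PySem.Set.ofList spell) (fun x => x) false).length = spell.length ∧
        PySem.List.sorted (word.toList.map (fun c => String.ofList [c])) (fun x => x) false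
          = PySem.List.sorted (PySem.Set.ofList spell) (fun x => x) false) := by
  have hcount := PySem.List.foldl_count_if
      (fun i => decide (String.ofList [i] ∈ spell)) (PySem.Set.ofList word.toList) (0 : Int)
  simp only [decide_eq_true_eq, zero_add] at hcount
  set D : List Char := PySem.Set.ofList word.toList with hD
  set S : List String := PySem.Set.ofList spell with hS
  set p : Char → Bool := fun i => decide (String.ofList [i] ∈ spell) with hp
  set M : List String := word.toList.map (fun c => String.ofList [c]) with hM
  have hkeylen : (PySem.List.sorted S (fun x => x) false).length = S.length :=
    PySem.List.length_sorted S _ _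
  have hSlen : S.length ≤ spell.length := PySem.Set.length_ofList_le spell
  have hDlen : D.length ≤ word.toList.length := PySem.Set.length_ofList_le word.toList
  have hDnodup : D.Nodup := PySem.Set.nodup_ofList word.toList
  have hSnodup : S.Nodup := PySem.Set.nodup_ofList spell
  constructor
  · rintro ⟨h1, h2⟩
    rw [hcount] at h2
    have h1n : word.toList.length = spell.length := by
      simpa [PySem.Str.len, PySem.List.len] using h1
    have h2n : D.countP p = spell.length := by
      have h2' := h2; simp only [PySem.List.len] at h2'; exact_mod_cast h2'
    have hcle : D.countP p ≤ D.length := List.countP_le_length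
    have hDeq : D.length = word.toList.length := by omega
    have hcntfull : D.countP p = D.length := by omega
    have hall : ∀ c ∈ D, p c = true := List.countP_eq_length.mp hcntfull
    -- word.toList ~ D
    have hDsub : List.Subperm D word.toList :=
      hDnodup.subperm (fun x hx => (PySem.Set.mem_ofList _ _).mp hx)
    have hpermWD : D.Perm word.toList := hDsub.perm_of_length_le (le_of_eq hDeq.symm)
    -- D.map mk ~ S
    have hMDnodup : (D.map (fun c => String.ofList [c])).Nodup := hDnodup.map mkSingleton_inj
    have hMDsub : List.Subperm (D.map (fun c => String.ofList [c])) S := by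
      refine hMDnodup.subperm ?_
      rintro x hx
      rcases List.mem_map.mp hx with ⟨c, hc, rfl⟩
      have : String.ofList [c] ∈ spell := by simpa [hp] using hall c hc
      exact (PySem.Set.mem_ofList _ _).mpr this
    have hMDlen : (D.map (fun c => String.ofList [c])).length = D.length := by simp
    have hpermMS : (D.map (fun c => String.ofList [c])).Perm S :=
      hMDsub.perm_of_length_le (by omega)
    have hpermM : M.Perm S := by
      have := (hpermWD.symm.map (fun c => String.ofList [c])).trans hpermMS
      simpa [hM] using this
    refine ⟨?_, ?_⟩
    · have := hpermMS.length_eq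
      simp at this
      omega
    · exact (PySem.List.sorted_id_eq_sorted_id_iff_perm _ _).mpr hpermM
  · rintro ⟨hk, hs⟩
    have hpermM : M.Perm S := (PySem.List.sorted_id_eq_sorted_id_iff_perm _ _).mp hs
    have hMnodup : M.Nodup := (hpermM.nodup_iff).mpr hSnodup
    have hwnodup : word.toList.Nodup := by
      have := hMnodup
      rw [hM] at this
      exact this.of_map
    have hDself : D = word.toList := by
      rw [hD]; exact PySem.Set.ofList_eq_self_of_nodup _ hwnodup
    have hSl : S.length = spell.length := by rw [← hkeylen]; exact hk
    have hlen : word.toList.length = spell.length := by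
      have h1 := hpermM.length_eq
      rw [hM, List.length_map] at h1
      exact h1.trans hSl
    have hall : ∀ c ∈ D, p c = true := by
      intro c hc
      have hcM : String.ofList [c] ∈ M := by
        rw [hM]
        exact List.mem_map.mpr ⟨c, by rwa [hDself] at hc, rfl⟩
      have : String.ofList [c] ∈ S := (hpermM.mem_iff).mp hcM
      have : String.ofList [c] ∈ spell := (PySem.Set.mem_ofList _ _).mp this
      simpa [hp]
    refine ⟨?_, ?_⟩
    · simp [PySem.Str.len, PySem.List.len, hlen]
    · rw [hcount]
      have : D.countP p = D.length := List.countP_eq_length.mpr hall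
      rw [this, hDself]
      simp [PySem.List.len, hlen]

theorem foldl_stays_one (p : String → Bool) (l : List String) :
    l.foldl (fun a w => if p w then 1 else a) (1 : Int) = 1 := by
  induction l with
  | nil => rfl
  | cons x xs ih => simp [List.foldl_cons, ih, ite_self]

theorem foldl_eq_any (p : String → Bool) (l : List String) :
    l.foldl (fun a w => if p w then 1 else a) (2 : Int) = (if l.any p then 1 else 2) := by
  induction l with
  | nil => rfl
  | cons x xs ih =>
      by_cases hx : p x = true
      · simp [List.foldl_cons, hx, foldl_stays_one]
      · simp only [Bool.not_eq_true] at hx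
        simp [List.foldl_cons, hx, ih]

-- ===== VERDICT (by name: the statement is the Claim_ definition above) =====
theorem solution_spec : Claim_equal_solution := by
  intro spell dic _
  show solution spell dic = solution_alt spell dic
  unfold solution solution_alt
  simp only []
  set key : List String := PySem.List.sorted (PySem.Set.ofList spell) (fun x => x) false with hkey
  by_cases hkl : (PySem.List.len key ≠ PySem.List.len spell)
  · -- spell has duplicate letters: no word ever matches in A either
    rw [if_pos hkl]
    have hklne : key.length ≠ spell.length := by
      intro h; exact hkl (by simp [PySem.List.len, h])
    have hstep : (fun (a : Int) (word : String) =>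
        if PySem.Str.len word ≠ PySem.List.len spell then a
        else
          if ((PySem.Set.ofList word.toList).foldl
                (fun c i => if String.ofList [i] ∈ spell then c + 1 else c) (0 : Int))
              = PySem.List.len spell then 1 else a)
        = fun (a : Int) (_ : String) => a := by
      funext a word
      by_cases h1 : PySem.Str.len word = PySem.List.len spell
      · rw [if_neg (fun hne => hne h1)]
        by_cases h2 : ((PySem.Set.ofList word.toList).foldl
            (fun c i => if String.ofList [i] ∈ spell then c + 1 else c) (0 : Int))
            = PySem.List.len spell
        · exact absurd ((matchA_iff spell word).mp ⟨h1, h2⟩).1 hklne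
        · rw [if_neg h2]
      · rw [if_pos h1]
    rw [hstep]
    simp
  · rw [if_neg hkl]
    rw [not_not] at hkl
    have hkln : key.length = spell.length := by
      simpa [PySem.List.len] using hkl
    have hstep : (fun (a : Int) (word : String) =>
        if PySem.Str.len word ≠ PySem.List.len spell then a
        else
          if ((PySem.Set.ofList word.toList).foldl
                (fun c i => if String.ofList [i] ∈ spell then c + 1 else c) (0 : Int))
              = PySem.List.len spell then 1 else a)
        = fun (a : Int) (word : String) =>
          if (PySem.List.sorted (word.toList.map (fun c => String.ofList [c])) (fun x => x) false == key) then 1 else a := by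
      funext a word
      by_cases hb : PySem.List.sorted (word.toList.map (fun c => String.ofList [c])) (fun x => x) false = key
      · have hm := (matchA_iff spell word).mpr ⟨hkln, hb⟩
        rw [if_neg (fun hne => hne hm.1), if_pos hm.2]
        simp [hb]
      · have hnot : ¬ (PySem.Str.len word = PySem.List.len spell ∧
            ((PySem.Set.ofList word.toList).foldl
                (fun c i => if String.ofList [i] ∈ spell then c + 1 else c) (0 : Int))
              = PySem.List.len spell) := fun hm => hb ((matchA_iff spell word).mp hm).2
        have : (PySem.List.sorted (word.toList.map (fun c => String.ofList [c])) (fun x => x) false == key) = false := by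
          simpa using hb
        rw [this]
        by_cases h1 : PySem.Str.len word = PySem.List.len spell
        · rw [if_neg (fun hne => hne h1), if_neg (fun h2 => hnot ⟨h1, h2⟩)]
          simp
        · rw [if_pos h1]; simp
    rw [hstep, foldl_eq_any]
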